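-- pv_equiv track=rewrite | github.com/karlosss/sudoku | solver2.py | sudokuVyreseno
-- ===== SOURCE A (Python) =====
-- def sudokuVyreseno(reseni):
--     # test, zda je sudoku zcela vyplneno (neobsahuje nulu, nevyplnene policko)
--     # provedeme tak, ze sloucime matici 9x9 do jednoho 81 prvku velkeho pole a jednoduse overime vyskyt nuly
--
--     merged = []
--     for i in reseni:
--         merged = merged + i
--
--     if 0 not in merged:
--         return True
--     else:
--         return False
-- ===== SOURCE B (Python) =====
-- def sudokuVyreseno(reseni):
--     # short-circuit over rows: no flattened copy is built
--     return all(0 not in row for row in reseni)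
-- ===== Notes on version B (the rewrite author's own statement) =====
-- stated objective: faster
-- what changed: B drops the quadratic flatten (repeated list concatenation) and the membership scan over the 81-cell copy; it short-circuits with all(0 not in row for row in rows).
import Mathlib
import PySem

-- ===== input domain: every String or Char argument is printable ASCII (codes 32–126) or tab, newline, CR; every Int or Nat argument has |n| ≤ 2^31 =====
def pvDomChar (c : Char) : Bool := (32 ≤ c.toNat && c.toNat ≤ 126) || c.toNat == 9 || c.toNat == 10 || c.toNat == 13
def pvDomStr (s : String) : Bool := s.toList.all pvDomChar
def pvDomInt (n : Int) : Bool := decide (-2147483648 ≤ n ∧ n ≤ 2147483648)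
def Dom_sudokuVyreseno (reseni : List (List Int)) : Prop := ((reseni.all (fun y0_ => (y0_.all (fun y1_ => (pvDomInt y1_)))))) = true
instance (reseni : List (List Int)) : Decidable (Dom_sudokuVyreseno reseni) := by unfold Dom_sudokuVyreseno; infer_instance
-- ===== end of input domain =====

-- B replaces A's flatten-then-scan by a short-circuiting per-row check (simpler, no copy).


-- ===== PORT A =====
-- A: flatten all rows into one list by repeated concatenation, then test 0 membership
def sudokuVyreseno (reseni : List (List Int)) : Bool :=
  let merged := reseni.foldl (fun acc i => acc ++ i) []
  if ¬ merged.contains 0 then true else false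

-- ===== PORT B =====
-- B: short-circuit over rows, no flattened copy
def sudokuVyreseno_alt (reseni : List (List Int)) : Bool :=
  reseni.all (fun row => !row.contains 0)

-- ===== PRECONDITION & SPEC =====
def Spec_sudokuVyreseno (reseni : List (List Int)) (out : Bool) : Prop := out = sudokuVyreseno_alt reseni
instance (reseni : List (List Int)) (out : Bool) : Decidable (Spec_sudokuVyreseno reseni out) := by unfold Spec_sudokuVyreseno; infer_instance

-- ===== CLAIM (what is proved, stated in full; the proofs are below) =====
def Claim_equal_sudokuVyreseno : Prop := ∀ (reseni : List (List Int)), Dom_sudokuVyreseno reseni → Spec_sudokuVyreseno reseni (sudokuVyreseno reseni)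

-- ===== LEMMAS AND PROOFS =====

-- ===== VERDICT (by name: the statement is the Claim_ definition above) =====
lemma mem_foldl_append (reseni : List (List Int)) (acc : List Int) :
    (0 ∈ reseni.foldl (fun acc i => acc ++ i) acc)
      ↔ (0 ∈ acc ∨ ∃ row ∈ reseni, (0:Int) ∈ row) := by
  induction reseni generalizing acc with
  | nil => simp [List.foldl]
  | cons h t ih => simp [List.foldl, ih]; tauto

theorem sudokuVyreseno_spec : Claim_equal_sudokuVyreseno := by
  intro reseni _
  unfold Spec_sudokuVyreseno sudokuVyreseno sudokuVyreseno_alt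
  simp [mem_foldl_append]
  rw [Bool.eq_iff_iff]
  simp
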